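-- pv_equiv track=rewrite | github.com/arthurlazzari93/n1-assistente | app/bot.py | _build_kb_query_text
-- ===== SOURCE A (Python) =====
-- from typing import Any, Dict, List, Optional
--
-- def _build_kb_query_text(ticket_ctx: Dict[str, Any], conv: Dict[str, Any]) -> str:
--     subject = (ticket_ctx.get("subject") or "").strip()
--     first_action = (ticket_ctx.get("first_action_text") or "").strip()
--     last_user = ""
--     for msg in reversed(conv.get("hist", [])):
--         if (msg.get("role") or "").lower() == "user":
--             txt = (msg.get("text") or "").strip()
--             if txt:
--                 last_user = txt
--                 break
--     parts = [subject, first_action, last_user]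
--     return "\n".join(part for part in parts if part).strip()
-- ===== SOURCE B (Python) =====
-- def _build_kb_query_text(ticket_ctx, conv):
--     # Staged: materialize all qualifying user texts, then take the last one.
--     user_texts = [
--         (m.get("text") or "").strip()
--         for m in conv.get("hist", [])
--         if (m.get("role") or "").lower() == "user" and (m.get("text") or "").strip()
--     ]
--     parts = [
--         (ticket_ctx.get("subject") or "").strip(),
--         (ticket_ctx.get("first_action_text") or "").strip(),
--         user_texts[-1] if user_texts else "",
--     ]
--     return "\n".join(part for part in parts if part).strip()
-- ===== Notes on version B (the rewrite author's own statement) =====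
-- stated objective: alternative
-- what changed: B replaces A's reversed-scan-with-break by two staged passes: a list comprehension that materializes ALL non-empty user-message texts, then indexing its last element ([-1]); the subject/first_action extraction and final join are kept.
import Mathlib
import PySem

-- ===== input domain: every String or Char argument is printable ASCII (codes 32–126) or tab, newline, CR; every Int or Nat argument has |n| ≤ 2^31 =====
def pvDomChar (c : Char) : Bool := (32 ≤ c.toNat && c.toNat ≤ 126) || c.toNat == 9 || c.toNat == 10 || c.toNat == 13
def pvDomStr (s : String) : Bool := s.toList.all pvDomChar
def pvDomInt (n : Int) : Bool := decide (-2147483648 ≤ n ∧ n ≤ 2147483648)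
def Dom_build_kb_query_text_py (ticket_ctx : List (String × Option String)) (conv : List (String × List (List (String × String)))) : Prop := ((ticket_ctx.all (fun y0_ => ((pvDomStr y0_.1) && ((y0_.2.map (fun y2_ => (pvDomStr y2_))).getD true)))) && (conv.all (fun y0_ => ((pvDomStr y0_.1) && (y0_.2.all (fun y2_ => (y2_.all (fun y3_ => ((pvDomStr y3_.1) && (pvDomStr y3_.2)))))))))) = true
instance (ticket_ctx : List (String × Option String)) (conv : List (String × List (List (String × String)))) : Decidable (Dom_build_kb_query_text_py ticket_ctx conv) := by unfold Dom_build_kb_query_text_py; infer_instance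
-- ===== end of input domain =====

-- B: staged passes — materialize all non-empty user texts with a filterMap/comprehension and take the last — instead of A's reversed scan with break; same return value (alternative decomposition, not faster).


-- ===== PORT A =====
def pvGet {v : Type} (d : List (String × v)) (k : String) : Option v :=
  (d.find? (fun p => p.1 == k)).map (·.2)

-- A's reversed-loop-with-break: first qualifying message of the reversed history
def pvA_lastUser : List (List (String × String)) → String
  | [] => ""
  | msg :: rest =>
    if PySem.Str.lower ((pvGet msg "role").getD "") == "user" then
      let txt := PySem.Str.strip ((pvGet msg "text").getD "")
      if txt ≠ "" then txt else pvA_lastUser rest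
    else pvA_lastUser rest

def build_kb_query_text_py (ticket_ctx : List (String × Option String)) (conv : List (String × List (List (String × String)))) : String :=
  let subject := PySem.Str.strip (((pvGet ticket_ctx "subject").getD none).getD "")
  let first_action := PySem.Str.strip (((pvGet ticket_ctx "first_action_text").getD none).getD "")
  let last_user := pvA_lastUser ((pvGet conv "hist").getD []).reverse
  PySem.Str.strip (PySem.Str.join "\n" (([subject, first_action, last_user]).filter (fun p => !(p == ""))))

-- ===== PORT B =====
-- B's comprehension body: the stripped text of a qualifying user message, else none
def pvB_userText (msg : List (String × String)) : Option String :=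
  let txt := PySem.Str.strip ((pvGet msg "text").getD "")
  if PySem.Str.lower ((pvGet msg "role").getD "") == "user" && txt ≠ "" then some txt else none

def build_kb_query_text_py_alt (ticket_ctx : List (String × Option String)) (conv : List (String × List (List (String × String)))) : String :=
  let user_texts := ((pvGet conv "hist").getD []).filterMap pvB_userText
  let parts := [PySem.Str.strip (((pvGet ticket_ctx "subject").getD none).getD ""),
                PySem.Str.strip (((pvGet ticket_ctx "first_action_text").getD none).getD ""),
                user_texts.getLast?.getD ""]
  PySem.Str.strip (PySem.Str.join "\n" (parts.filter (fun p => !(p == ""))))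

-- ===== PRECONDITION & SPEC =====
def Spec_build_kb_query_text_py (ticket_ctx : List (String × Option String)) (conv : List (String × List (List (String × String)))) (out : String) : Prop := out = build_kb_query_text_py_alt ticket_ctx conv
instance (ticket_ctx : List (String × Option String)) (conv : List (String × List (List (String × String)))) (out : String) : Decidable (Spec_build_kb_query_text_py ticket_ctx conv out) := by unfold Spec_build_kb_query_text_py; infer_instance

-- ===== CLAIM (what is proved, stated in full; the proofs are below) =====
def Claim_equal_build_kb_query_text_py : Prop := ∀ (ticket_ctx : List (String × Option String)) (conv : List (String × List (List (String × String)))), Dom_build_kb_query_text_py ticket_ctx conv → Spec_build_kb_query_text_py ticket_ctx conv (build_kb_query_text_py ticket_ctx conv)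

-- ===== LEMMAS AND PROOFS =====
-- A's scan returns the first qualifying text, i.e. the head of the filterMap
lemma pv_scan_eq_head (l : List (List (String × String))) :
    pvA_lastUser l = ((l.filterMap pvB_userText).head?).getD "" := by
  induction l with
  | nil => rfl
  | cons m rest ih =>
    simp only [List.filterMap_cons]
    unfold pvA_lastUser
    by_cases hr : (PySem.Str.lower ((pvGet m "role").getD "") == "user") = true
    · by_cases ht : PySem.Str.strip ((pvGet m "text").getD "") = ""
      · rw [show pvB_userText m = none from by simp [pvB_userText, ht]]
        simp only [hr, ht, if_true]
        simpa [ht] using ih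
      · rw [show pvB_userText m = some (PySem.Str.strip ((pvGet m "text").getD "")) from by
            simp [pvB_userText, hr, ht]]
        simp [hr, ht]
    · rw [show pvB_userText m = none from by simp [pvB_userText, hr]]
      simp [hr, ih]

-- hence A's reversed scan is the last qualifying text
lemma pv_last_user_eq (l : List (List (String × String))) :
    pvA_lastUser l.reverse = ((l.filterMap pvB_userText).getLast?).getD "" := by
  rw [pv_scan_eq_head, List.filterMap_reverse, List.head?_reverse]

-- ===== VERDICT (by name: the statement is the Claim_ definition above) =====
theorem build_kb_query_text_py_spec : Claim_equal_build_kb_query_text_py := by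
  intro tc conv _
  unfold Spec_build_kb_query_text_py
  simp only [build_kb_query_text_py, build_kb_query_text_py_alt, pv_last_user_eq]
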